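-- pv_equiv track=rewrite | github.com/Janecjy/Transformer-training | utils.py | check_buckets
-- ===== SOURCE A (Python) =====
-- def check_buckets(tokens, buckets):
--     bucket_indicators = {bucket: 0 for bucket in buckets}
--     for value in tokens:
--         for bucket in buckets:
--             if bucket[0] <= value < bucket[1]:
--                 bucket_indicators[bucket] = 1
--                 break
--     return bucket_indicators
-- ===== SOURCE B (Python) =====
-- def check_buckets(tokens, buckets):
--     # Bucket-major pass over a shrinking pool of distinct unclaimed token values,
--     # instead of A's token-major scan over all buckets.
--     remaining = list(dict.fromkeys(tokens))
--     res = {}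
--     for b in buckets:
--         if b not in res:
--             lo, hi = b
--             kept = [v for v in remaining if not (lo <= v < hi)]
--             res[b] = 1 if len(kept) < len(remaining) else 0
--             remaining = kept
--     return res
-- ===== Notes on version B (the rewrite author's own statement) =====
-- stated objective: alternative
-- what changed: A scans all buckets per token with a break; B inverts the loops: it makes one bucket-major pass over a shrinking pool of distinct unclaimed token values, flagging a bucket iff it captures some still-unclaimed value and removing the captured values.
import Mathlib
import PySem

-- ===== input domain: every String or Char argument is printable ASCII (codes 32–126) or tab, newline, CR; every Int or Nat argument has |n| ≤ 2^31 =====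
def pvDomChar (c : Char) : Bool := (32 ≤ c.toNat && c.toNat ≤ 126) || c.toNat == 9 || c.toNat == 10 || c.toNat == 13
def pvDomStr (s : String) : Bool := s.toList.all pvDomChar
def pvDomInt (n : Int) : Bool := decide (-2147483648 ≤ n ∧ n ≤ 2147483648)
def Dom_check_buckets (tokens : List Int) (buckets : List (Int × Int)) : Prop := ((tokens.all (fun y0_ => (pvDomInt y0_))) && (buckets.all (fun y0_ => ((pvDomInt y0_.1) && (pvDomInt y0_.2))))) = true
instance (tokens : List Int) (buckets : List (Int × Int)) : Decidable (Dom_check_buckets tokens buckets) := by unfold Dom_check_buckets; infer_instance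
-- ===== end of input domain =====

-- B replaces A's token-major scan over all buckets (with break) by a bucket-major pass over a
-- shrinking pool of distinct unclaimed token values; objective: alternative.

-- ===== PORT A =====
-- inner loop 'for bucket in buckets: if bucket[0] <= value < bucket[1]: d[bucket] = 1; break'
def cbInner (v : Int) (d : PySem.Dict (Int × Int) Int) : List (Int × Int) → PySem.Dict (Int × Int) Int
  | [] => d
  | b :: rest => if b.1 ≤ v ∧ v < b.2 then d.insert b 1 else cbInner v d rest

def check_buckets (tokens : List Int) (buckets : List (Int × Int)) : List (Int × Int × Int) :=
  -- bucket_indicators = {bucket: 0 for bucket in buckets}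
  let d0 := buckets.foldl (fun d b => d.insert b 0) PySem.Dict.empty
  -- for value in tokens: <inner loop>
  let d := tokens.foldl (fun d v => cbInner v d buckets) d0
  d.items.map (fun p => (p.1.1, p.1.2, p.2))

-- ===== PORT B =====
def check_buckets_alt (tokens : List Int) (buckets : List (Int × Int)) : List (Int × Int × Int) :=
  -- remaining = list(dict.fromkeys(tokens)); res = {}
  let st := buckets.foldl (fun st b =>
      if st.2.contains b then st
      else
        let kept := st.1.filter (fun v => !(decide (b.1 ≤ v ∧ v < b.2)))
        (kept, st.2.insert b (if kept.length < st.1.length then 1 else 0)))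
    ((PySem.List.dedup tokens, PySem.Dict.empty))
  st.2.items.map (fun p => (p.1.1, p.1.2, p.2))

-- ===== PRECONDITION & SPEC =====
def Spec_check_buckets (tokens : List Int) (buckets : List (Int × Int)) (out : List (Int × Int × Int)) : Prop := out = check_buckets_alt tokens buckets
instance (tokens : List Int) (buckets : List (Int × Int)) (out : List (Int × Int × Int)) : Decidable (Spec_check_buckets tokens buckets out) := by unfold Spec_check_buckets; infer_instance

-- ===== CLAIM (what is proved, stated in full; the proofs are below) =====
def Claim_equal_check_buckets : Prop := ∀ (tokens : List Int) (buckets : List (Int × Int)), Dom_check_buckets tokens buckets → Spec_check_buckets tokens buckets (check_buckets tokens buckets)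

-- ===== LEMMAS AND PROOFS =====

-- first bucket (in list order) containing v: what A's inner break-loop selects
def cbFm (buckets : List (Int × Int)) (v : Int) : Option (Int × Int) :=
  buckets.find? (fun b => decide (b.1 ≤ v ∧ v < b.2))

-- the common reference value: one entry per distinct bucket, flagged iff it is some token's first match
def cbFlag (tokens : List Int) (full : List (Int × Int)) (k : Int × Int) : Int :=
  if ∃ v ∈ tokens, cbFm full v = some k then 1 else 0

def cbRef (tokens : List Int) (buckets : List (Int × Int)) : List (Int × Int × Int) :=
  (PySem.Set.ofList buckets).map (fun k => (k.1, k.2, cbFlag tokens buckets k))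

theorem cbInner_eq (v : Int) (d : PySem.Dict (Int × Int) Int) (bs : List (Int × Int)) :
    cbInner v d bs = match cbFm bs v with | some b => d.insert b 1 | none => d := by
  induction bs with
  | nil => rfl
  | cons b rest ih =>
    by_cases h : b.1 ≤ v ∧ v < b.2
    · simp [cbInner, cbFm, h]
    · simp only [cbInner, cbFm, if_neg h]
      rw [List.find?_cons_of_neg (by simpa using h)]
      simpa only [cbFm] using ih

theorem cb_d0_getD (bs : List (Int × Int)) (k : Int × Int) :
    ∀ d : PySem.Dict (Int × Int) Int, d.getD k 0 = 0 →
      (bs.foldl (fun d b => d.insert b 0) d).getD k 0 = 0 := by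
  induction bs with
  | nil => intro d h; simpa using h
  | cons b rest ih =>
    intro d h
    simp only [List.foldl_cons]
    exact ih _ (by rw [PySem.Dict.getD_insert]; split <;> simp [h])

theorem cb_foldA_get? (buckets : List (Int × Int)) (tokens : List Int) :
    ∀ (d : PySem.Dict (Int × Int) Int) (k : Int × Int),
      (tokens.foldl (fun d v => cbInner v d buckets) d).get? k
        = if ∃ v ∈ tokens, cbFm buckets v = some k then some 1 else d.get? k := by
  induction tokens with
  | nil => intro d k; simp
  | cons t ts ih =>
    intro d k
    simp only [List.foldl_cons]
    rw [ih, cbInner_eq]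
    rcases hfm : cbFm buckets t with _ | b
    · by_cases hts : ∃ v ∈ ts, cbFm buckets v = some k
      · rw [if_pos hts, if_pos]
        rcases hts with ⟨v, hv, hk⟩; exact ⟨v, List.mem_cons.mpr (Or.inr hv), hk⟩
      · simp only [hts, if_false]
        rw [if_neg]
        rintro ⟨v, hv, hk⟩
        rcases List.mem_cons.mp hv with rfl | hv
        · rw [hfm] at hk; cases hk
        · exact hts ⟨v, hv, hk⟩
    · rw [PySem.Dict.get?_insert]
      by_cases hts : ∃ v ∈ ts, cbFm buckets v = some k
      · rw [if_pos hts, if_pos]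
        rcases hts with ⟨v, hv, hk⟩; exact ⟨v, List.mem_cons.mpr (Or.inr hv), hk⟩
      · rw [if_neg hts]
        by_cases hkb : k = b
        · subst hkb
          rw [if_pos rfl, if_pos ⟨t, List.mem_cons.mpr (Or.inl rfl), hfm⟩]
        · rw [if_neg hkb, if_neg]
          rintro ⟨v, hv, hk⟩
          rcases List.mem_cons.mp hv with rfl | hv
          · rw [hfm] at hk; exact hkb (by injection hk.symm)
          · exact hts ⟨v, hv, hk⟩

theorem cb_foldA_keys (buckets : List (Int × Int)) (tokens : List Int) :
    ∀ d : PySem.Dict (Int × Int) Int, (∀ b ∈ buckets, d.contains b = true) →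
      (tokens.foldl (fun d v => cbInner v d buckets) d).keys = d.keys := by
  induction tokens with
  | nil => intro d _; rfl
  | cons t ts ih =>
    intro d hd
    simp only [List.foldl_cons]
    rw [cbInner_eq]
    rcases hfm : cbFm buckets t with _ | b
    · exact ih d hd
    · have hb : b ∈ buckets := List.mem_of_find?_eq_some hfm
      have hcont : d.contains b = true := hd b hb
      have hkeys : (d.insert b 1).keys = d.keys := PySem.Dict.keys_insert_of_contains d 1 hcont
      rw [ih _ (by
        intro b' hb'
        rw [PySem.Dict.contains_insert]
        simp [hd b' hb'])]
      exact hkeys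

theorem cb_A_eq_ref (tokens : List Int) (buckets : List (Int × Int)) :
    check_buckets tokens buckets = cbRef tokens buckets := by
  unfold check_buckets cbRef
  show (List.map (fun p => (p.1.1, p.1.2, p.2))
      (List.foldl (fun d v => cbInner v d buckets)
        (List.foldl (fun d b => d.insert b 0) PySem.Dict.empty buckets) tokens).items)
    = List.map (fun k => (k.1, k.2, cbFlag tokens buckets k)) (PySem.Set.ofList buckets)
  have hkeys0 : (buckets.foldl (fun d b => d.insert b 0) (PySem.Dict.empty : PySem.Dict (Int × Int) Int)).keys
      = PySem.Set.ofList buckets := by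
    rw [PySem.Dict.keys_foldl_insert buckets (fun _ _ => (0:Int))]
    simp [PySem.Dict.keys_empty, PySem.Set.ofList_eq_foldl, PySem.Set.update]
  have hnodup0 : (buckets.foldl (fun d b => d.insert b 0) (PySem.Dict.empty : PySem.Dict (Int × Int) Int)).keys.Nodup := by
    exact PySem.Dict.nodup_keys_foldl_insert buckets (fun _ _ => (0:Int)) _ (by simp [PySem.Dict.keys_empty])
  have hkeys : (tokens.foldl (fun d v => cbInner v d buckets)
      (buckets.foldl (fun d b => d.insert b 0) PySem.Dict.empty)).keys = PySem.Set.ofList buckets := by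
    rw [cb_foldA_keys buckets tokens _ (by
      intro b hb
      rw [PySem.Dict.contains_iff_mem_keys, hkeys0]
      exact (PySem.Set.mem_ofList buckets b).mpr hb)]
    exact hkeys0
  have hnodup : (tokens.foldl (fun d v => cbInner v d buckets)
      (buckets.foldl (fun d b => d.insert b 0) PySem.Dict.empty)).keys.Nodup := by
    rw [hkeys, ← hkeys0]; exact hnodup0
  rw [PySem.Dict.items_eq_map_keys _ hnodup 0, hkeys, List.map_map]
  apply List.map_congr_left
  intro k _
  have hget := cb_foldA_get? buckets tokens (buckets.foldl (fun d b => d.insert b 0) PySem.Dict.empty) k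
  have hd0 : (buckets.foldl (fun d b => d.insert b 0) (PySem.Dict.empty : PySem.Dict (Int × Int) Int)).getD k 0 = 0 :=
    cb_d0_getD buckets k _ (by simp)
  simp only [Function.comp_apply, cbFlag]
  rw [PySem.Dict.getD_eq_get?_getD, hget]
  split
  · rfl
  · rw [← PySem.Dict.getD_eq_get?_getD, hd0]

-- B-side: first-match over pre ++ b :: bs, at b's first occurrence
theorem cb_fm_append (pre bs : List (Int × Int)) (b : Int × Int) (v : Int) (hb : b ∉ pre) :
    cbFm (pre ++ b :: bs) v = some b ↔
      (∀ b' ∈ pre, ¬(b'.1 ≤ v ∧ v < b'.2)) ∧ (b.1 ≤ v ∧ v < b.2) := by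
  unfold cbFm
  rw [List.find?_append]
  rcases hpre : List.find? (fun b => decide (b.1 ≤ v ∧ v < b.2)) pre with _ | b'
  · have hnone : ∀ b' ∈ pre, ¬(b'.1 ≤ v ∧ v < b'.2) := by
      intro b' hb'
      have := List.find?_eq_none.mp hpre b' hb'
      simpa using this
    rw [hpre, Option.none_or]
    by_cases hin : b.1 ≤ v ∧ v < b.2
    · rw [List.find?_cons_of_pos (by simpa using hin)]
      exact ⟨fun _ => ⟨hnone, hin⟩, fun _ => rfl⟩
    · rw [List.find?_cons_of_neg (by simpa using hin)]
      constructor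
      · intro h
        have := List.find?_some h
        exact absurd (by simpa using this) hin
      · rintro ⟨_, h⟩; exact absurd h hin
  · have hmem : b' ∈ pre := List.mem_of_find?_eq_some hpre
    have hin' : b'.1 ≤ v ∧ v < b'.2 := by simpa using List.find?_some hpre
    rw [hpre, Option.some_or]
    constructor
    · intro h
      injection h with h
      subst h
      exact absurd hmem hb
    · rintro ⟨hall, _⟩
      exact absurd hin' (hall b' hmem)

theorem cb_ofList_append_mem {pre : List (Int × Int)} {b : Int × Int} (h : b ∈ pre) :
    PySem.Set.ofList (pre ++ [b]) = PySem.Set.ofList pre := by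
  rw [PySem.Set.ofList_eq_foldl, List.foldl_append, ← PySem.Set.ofList_eq_foldl]
  simp only [List.foldl_cons, List.foldl_nil, PySem.Set.add]
  have hc : PySem.Set.contains (PySem.Set.ofList pre) b = true := by
    simp [PySem.Set.contains, (PySem.Set.mem_ofList pre b).mpr h]
  rw [if_pos hc]

theorem cb_ofList_append_not_mem {pre : List (Int × Int)} {b : Int × Int} (h : b ∉ pre) :
    PySem.Set.ofList (pre ++ [b]) = PySem.Set.ofList pre ++ [b] := by
  rw [PySem.Set.ofList_eq_foldl, List.foldl_append, ← PySem.Set.ofList_eq_foldl]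
  simp only [List.foldl_cons, List.foldl_nil, PySem.Set.add]
  have hnm : b ∉ PySem.Set.ofList pre := fun hmem => h ((PySem.Set.mem_ofList pre b).mp hmem)
  have hc : PySem.Set.contains (PySem.Set.ofList pre) b = false := by
    simp [PySem.Set.contains, hnm]
  rw [if_neg (by simp [h])]

theorem cb_dictmk_contains (pre : List (Int × Int)) (f : Int × Int → Int) (b : Int × Int) :
    (PySem.Dict.mk ((PySem.Set.ofList pre).map (fun k => (k, f k)))).contains b
      = decide (b ∈ pre) := by
  rw [PySem.Dict.contains_mk]
  by_cases h : b ∈ pre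
  · simp only [h, decide_true]
    rw [List.any_eq_true]
    exact ⟨(b, f b), List.mem_map.mpr ⟨b, (PySem.Set.mem_ofList pre b).mpr h, rfl⟩, by simp⟩
  · simp only [h, decide_false]
    rw [List.any_eq_false]
    intro p hmem
    rcases List.mem_map.mp hmem with ⟨k', hk', rfl⟩
    simp only [beq_iff_eq]
    intro hkb
    exact h (hkb ▸ (PySem.Set.mem_ofList pre k').mp hk')

theorem cb_foldB (tokens : List Int) (full : List (Int × Int)) :
    ∀ (bs pre : List (Int × Int)), pre ++ bs = full →
      (bs.foldl (fun st b =>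
          if st.2.contains b then st
          else
            let kept := st.1.filter (fun v => !(decide (b.1 ≤ v ∧ v < b.2)))
            (kept, st.2.insert b (if kept.length < st.1.length then 1 else 0)))
        (((PySem.List.dedup tokens).filter (fun v => decide (∀ b' ∈ pre, ¬(b'.1 ≤ v ∧ v < b'.2))),
          PySem.Dict.mk ((PySem.Set.ofList pre).map (fun k => (k, cbFlag tokens full k))))))
      = (((PySem.List.dedup tokens).filter (fun v => decide (∀ b' ∈ full, ¬(b'.1 ≤ v ∧ v < b'.2))),
          PySem.Dict.mk ((PySem.Set.ofList full).map (fun k => (k, cbFlag tokens full k))))) := by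
  intro bs
  induction bs with
  | nil => intro pre h; simp at h; subst h; rfl
  | cons b rest ih =>
    intro pre h
    simp only [List.foldl_cons]
    rw [cb_dictmk_contains]
    by_cases hb : b ∈ pre
    · simp only [hb, decide_true, if_true]
      have h' : (pre ++ [b]) ++ rest = full := by simpa using h
      have := ih (pre ++ [b]) h'
      rw [cb_ofList_append_mem hb] at this
      rw [← this]
      congr 2
      apply List.filter_congr
      intro v _
      simp only [decide_eq_decide]
      constructor
      · intro hall b' hb'
        rcases List.mem_append.mp hb' with h1 | h1
        · exact hall b' h1
        · simp at h1; subst h1; exact hall _ hb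
      · intro hall b' hb'; exact hall b' (List.mem_append.mpr (Or.inl hb'))
    · simp only [hb, decide_false, Bool.false_eq_true, if_false]
      have h' : (pre ++ [b]) ++ rest = full := by simpa using h
      have hrem : ((PySem.List.dedup tokens).filter (fun v => decide (∀ b' ∈ pre, ¬(b'.1 ≤ v ∧ v < b'.2)))).filter
            (fun v => !(decide (b.1 ≤ v ∧ v < b.2)))
          = (PySem.List.dedup tokens).filter (fun v => decide (∀ b' ∈ pre ++ [b], ¬(b'.1 ≤ v ∧ v < b'.2))) := by
        rw [List.filter_filter]
        apply List.filter_congr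
        intro v _
        by_cases hin : b.1 ≤ v ∧ v < b.2
        · have hnall : ¬ (∀ b' ∈ pre ++ [b], ¬(b'.1 ≤ v ∧ v < b'.2)) := fun hc => (hc b (by simp)) hin
          rw [decide_eq_true hin, decide_eq_false hnall]
          simp
        · by_cases hall : ∀ b' ∈ pre, ¬(b'.1 ≤ v ∧ v < b'.2)
          · have hall' : ∀ b' ∈ pre ++ [b], ¬(b'.1 ≤ v ∧ v < b'.2) := by
              intro b' hb'
              rcases List.mem_append.mp hb' with h1 | h1
              · exact hall b' h1
              · simp only [List.mem_singleton] at h1; subst h1; exact hin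
            rw [decide_eq_false hin, decide_eq_true hall, decide_eq_true hall']
            simp
          · have hnall : ¬ (∀ b' ∈ pre ++ [b], ¬(b'.1 ≤ v ∧ v < b'.2)) :=
              fun hc => hall (fun b' h1 => hc b' (List.mem_append.mpr (Or.inl h1)))
            rw [decide_eq_false hin, decide_eq_false hall, decide_eq_false hnall]
            simp
      have hflag :
          (if (((PySem.List.dedup tokens).filter (fun v => decide (∀ b' ∈ pre, ¬(b'.1 ≤ v ∧ v < b'.2)))).filter
                (fun v => !(decide (b.1 ≤ v ∧ v < b.2)))).length
              < ((PySem.List.dedup tokens).filter (fun v => decide (∀ b' ∈ pre, ¬(b'.1 ≤ v ∧ v < b'.2)))).length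
            then (1:Int) else 0)
          = cbFlag tokens full b := by
        unfold cbFlag
        have hiff : (((PySem.List.dedup tokens).filter (fun v => decide (∀ b' ∈ pre, ¬(b'.1 ≤ v ∧ v < b'.2)))).filter
                (fun v => !(decide (b.1 ≤ v ∧ v < b.2)))).length
              < ((PySem.List.dedup tokens).filter (fun v => decide (∀ b' ∈ pre, ¬(b'.1 ≤ v ∧ v < b'.2)))).length
            ↔ ∃ v ∈ tokens, cbFm full v = some b := by
          rw [List.length_filter_lt_length_iff_exists]
          constructor
          · rintro ⟨v, hv, hnp⟩
            rcases List.mem_filter.mp hv with ⟨hvd, hvall⟩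
            refine ⟨v, (PySem.List.mem_dedup tokens v).mp hvd, ?_⟩
            rw [← h', List.append_assoc]
            simp only [List.singleton_append]
            rw [cb_fm_append pre rest b v hb]
            exact ⟨by simpa using hvall, by simpa using hnp⟩
          · rintro ⟨v, hv, hfm⟩
            rw [← h', List.append_assoc] at hfm
            simp only [List.singleton_append] at hfm
            rw [cb_fm_append pre rest b v hb] at hfm
            refine ⟨v, List.mem_filter.mpr ⟨(PySem.List.mem_dedup tokens v).mpr hv, by simpa using hfm.1⟩, by simpa using hfm.2⟩
        by_cases hx : ∃ v ∈ tokens, cbFm full v = some b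
        · rw [if_pos (hiff.mpr hx), if_pos hx]
        · rw [if_neg (fun hlt => hx (hiff.mp hlt)), if_neg hx]
      have hins : (PySem.Dict.mk ((PySem.Set.ofList pre).map (fun k => (k, cbFlag tokens full k)))).insert b
            (cbFlag tokens full b)
          = PySem.Dict.mk ((PySem.Set.ofList (pre ++ [b])).map (fun k => (k, cbFlag tokens full k))) := by
        apply PySem.Dict.ext
        rw [PySem.Dict.items_insert_of_not_contains _ _ (by rw [cb_dictmk_contains]; simp [hb])]
        rw [cb_ofList_append_not_mem hb]
        simp
      rw [hflag, hins, hrem]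
      exact ih (pre ++ [b]) h'

theorem cb_B_eq_ref (tokens : List Int) (buckets : List (Int × Int)) :
    check_buckets_alt tokens buckets = cbRef tokens buckets := by
  unfold check_buckets_alt cbRef
  have := cb_foldB tokens buckets buckets [] (by simp)
  have hstart1 : (PySem.List.dedup tokens).filter (fun v => decide (∀ b' ∈ ([] : List (Int × Int)), ¬(b'.1 ≤ v ∧ v < b'.2)))
      = PySem.List.dedup tokens := by
    apply List.filter_eq_self.mpr; intro v _; simp
  have hstart2 : (PySem.Dict.mk ((PySem.Set.ofList ([] : List (Int × Int))).map (fun k => (k, cbFlag tokens buckets k))))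
      = (PySem.Dict.empty : PySem.Dict (Int × Int) Int) := by
    rfl
  rw [hstart1, hstart2] at this
  rw [this]
  show (List.map (fun p => (p.1.1, p.1.2, p.2))
      (List.map (fun k => (k, cbFlag tokens buckets k)) (PySem.Set.ofList buckets)))
      = List.map (fun k => (k.1, k.2, cbFlag tokens buckets k)) (PySem.Set.ofList buckets)
  rw [List.map_map]
  rfl

-- ===== VERDICT (by name: the statement is the Claim_ definition above) =====
theorem check_buckets_spec : Claim_equal_check_buckets := by
  intro tokens buckets _
  unfold Spec_check_buckets
  rw [cb_A_eq_ref, cb_B_eq_ref]
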